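-- pv_equiv track=rewrite | github.com/Ansidrake/Project_Euler | 862.py | generate_digit_distributions
-- ===== SOURCE A (Python) =====
-- def generate_digit_distributions(total_digits):
--     """
--     Generate all possible digit distributions for a given number of digits.
--     """
--     distributions = []
--
--     # Helper function to generate distributions recursively
--     def backtrack(remaining_digits, current_dist):
--         if remaining_digits == 0:
--             distributions.append(current_dist.copy())
--             return
--
--         for digit in range(0, 10):  # Skip 0
--             if sum(current_dist.values()) + digit <= total_digits:
--                 current_dist[digit] = current_dist.get(digit, 0) + 1
--                 backtrack(remaining_digits - 1, current_dist)
--                 current_dist[digit] -= 1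
--                 if current_dist[digit] == 0:
--                     del current_dist[digit]
--
--     backtrack(total_digits, {})
--     return distributions
-- ===== SOURCE B (Python) =====
-- def generate_digit_distributions(total_digits):
--     # Two-phase alternative: enumerate the digit sequences first (recursion with
--     # a comprehension; the bound min(9, remaining) replaces A's running-sum test),
--     # then turn each sequence into its first-occurrence-ordered count dict.
--     def seqs(remaining):
--         if remaining == 0:
--             return [()]
--         return [(d,) + rest
--                 for d in range(0, min(9, remaining) + 1)
--                 for rest in seqs(remaining - 1)]
--
--     result = []
--     for seq in seqs(total_digits):
--         dist = {}
--         for d in seq: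
--             dist[d] = dist.get(d, 0) + 1
--         result.append(dist)
--     return result
-- ===== Notes on version B (the rewrite author's own statement) =====
-- stated objective: alternative
-- what changed: A prunes with a running sum over one mutated backtracking dict; B first enumerates the digit sequences by a comprehension-style recursion bounded by min(9, remaining), then builds each first-occurrence count dict in a separate pass.
import Mathlib
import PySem

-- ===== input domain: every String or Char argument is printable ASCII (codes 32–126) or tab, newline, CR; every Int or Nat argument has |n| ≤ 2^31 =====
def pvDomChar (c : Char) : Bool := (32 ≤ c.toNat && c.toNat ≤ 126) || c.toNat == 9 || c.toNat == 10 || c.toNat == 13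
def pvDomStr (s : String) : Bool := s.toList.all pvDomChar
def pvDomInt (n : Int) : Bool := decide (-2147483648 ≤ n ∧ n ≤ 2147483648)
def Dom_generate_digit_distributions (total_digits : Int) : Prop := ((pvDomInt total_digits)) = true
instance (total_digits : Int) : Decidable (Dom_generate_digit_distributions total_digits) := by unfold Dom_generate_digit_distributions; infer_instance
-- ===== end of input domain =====

-- B replaces A's single mutated backtracking dict (pruned by a running value-sum) with a
-- two-phase alternative: enumerate the digit sequences, then count each one. Same cost.

-- ===== PORT A =====
-- A's backtrack: the mutable dict is passed functionally (the decrement/del after the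
-- recursive call restores exactly the dict from before the increment, so the next loop
-- iteration sees `dist` unchanged). `fuel` only makes the recursion structural: it starts
-- at total_digits.toNat and mirrors `remaining` (fuel = 0 with remaining ≠ 0 is reached
-- only when remaining < 0 with an empty dict, where the Python loop body never recurses
-- and returns `dists` unchanged, which is what the fuel-0 branch returns).
def pvBacktrackA (total : Int) : Nat → Int → PySem.Dict Int Int → List (List (Int × Int)) → List (List (Int × Int))
  | fuel, remaining, dist, dists =>
    if remaining = 0 then dists ++ [dist.items]
    else
      match fuel with
      | 0 => dists
      | f + 1 =>
        (PySem.List.pyRange 0 10 1).foldl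
          (fun acc digit =>
            if dist.values.sum + digit ≤ total then
              pvBacktrackA total f (remaining - 1) (dist.insert digit (dist.getD digit 0 + 1)) acc
            else acc)
          dists

def generate_digit_distributions (total_digits : Int) : List (List (Int × Int)) :=
  pvBacktrackA total_digits total_digits.toNat total_digits PySem.Dict.empty []

-- ===== PORT B =====
-- seqs(remaining): the nested comprehension is a flatMap; fuel as above (fuel = 0 with
-- remaining ≠ 0 is reached only for remaining < 0, where the Python range is empty).
def pvSeqsB : Nat → Int → List (List Int)
  | fuel, remaining =>
    if remaining = 0 then [[]]
    else
      match fuel with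
      | 0 => []
      | f + 1 =>
        (PySem.List.pyRange 0 (min 9 remaining + 1) 1).flatMap
          (fun d => (pvSeqsB f (remaining - 1)).map (fun rest => d :: rest))

def generate_digit_distributions_alt (total_digits : Int) : List (List (Int × Int)) :=
  (pvSeqsB total_digits.toNat total_digits).map
    (fun seq => (seq.foldl (fun dist d => dist.insert d (dist.getD d 0 + 1)) PySem.Dict.empty).items)

-- ===== PRECONDITION & SPEC =====
def Spec_generate_digit_distributions (total_digits : Int) (out : List (List (Int × Int))) : Prop := out = generate_digit_distributions_alt total_digits
instance (total_digits : Int) (out : List (List (Int × Int))) : Decidable (Spec_generate_digit_distributions total_digits out) := by unfold Spec_generate_digit_distributions; infer_instance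

-- ===== CLAIM (what is proved, stated in full; the proofs are below) =====
def Claim_equal_generate_digit_distributions : Prop := ∀ (total_digits : Int), Dom_generate_digit_distributions total_digits → Spec_generate_digit_distributions total_digits (generate_digit_distributions total_digits)

-- ===== LEMMAS AND PROOFS =====

-- the sum of the values of Counter(xs) is the length of xs
lemma pvValuesSumCounter (xs : List Int) :
    (PySem.Dict.counter xs : PySem.Dict Int Int).values.sum = (xs.length : Int) := by
  have hperm : (PySem.Set.ofList xs).Perm xs.dedup := by
    apply (List.perm_ext_iff_of_nodup (PySem.Set.nodup_ofList xs) xs.nodup_dedup).2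
    intro a; simp [PySem.Set.mem_ofList, List.mem_dedup]
  have h1 : (PySem.Dict.counter xs : PySem.Dict Int Int).values
      = (PySem.Set.ofList xs).map (fun k => (xs.count k : Int)) := by
    simp [PySem.Dict.values, PySem.Dict.items_counter, List.map_map, Function.comp]
  rw [h1, List.Perm.sum_eq (hperm.map _)]
  calc (xs.dedup.map (fun k => (xs.count k : Int))).sum
      = ((xs.dedup.map (fun k => xs.count k)).sum : Int) := by
        rw [Nat.cast_list_sum, List.map_map]; rfl
    _ = (xs.length : Int) := by rw [List.sum_map_count_dedup_eq_length xs]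

-- the digits d ∈ range(0, 10) with d ≤ r are exactly range(0, min 9 r + 1) (for r ≥ 0)
lemma pvFilterRange (r : Int) (hr : 0 ≤ r) :
    (PySem.List.pyRange 0 10 1).filter (fun d => decide (d ≤ r))
      = PySem.List.pyRange 0 (min 9 r + 1) 1 := by
  have h1 : (0:Int) ≤ min 9 r + 1 := by omega
  have h2 : min 9 r + 1 ≤ 10 := by omega
  rw [PySem.List.pyRange_one_append 0 (min 9 r + 1) 10 h1 h2, List.filter_append]
  have ha : (PySem.List.pyRange 0 (min 9 r + 1) 1).filter (fun d => decide (d ≤ r))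
      = PySem.List.pyRange 0 (min 9 r + 1) 1 := by
    apply List.filter_eq_self.2
    intro a ha
    rw [PySem.List.mem_pyRange_one] at ha
    simp; omega
  have hb : (PySem.List.pyRange (min 9 r + 1) 10 1).filter (fun d => decide (d ≤ r)) = [] := by
    apply List.filter_eq_nil_iff.2
    intro a ha
    rw [PySem.List.mem_pyRange_one] at ha
    simp; omega
  rw [ha, hb, List.append_nil]

-- main invariant: from the node reached by the digit prefix xs (where A's dict is
-- Counter(xs) and remaining = fuel = total - len(xs)), A's backtracking appends exactly
-- the counted extensions that B enumerates
lemma pvMain (total : Int) : ∀ (f : Nat) (xs : List Int) (dists : List (List (Int × Int))),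
    (xs.length : Int) + f = total →
    pvBacktrackA total f (f : Int) (PySem.Dict.counter xs) dists
      = dists ++ (pvSeqsB f (f : Int)).map (fun seq => (PySem.Dict.counter (xs ++ seq)).items) := by
  intro f
  induction f with
  | zero =>
    intro xs dists h
    simp [pvBacktrackA, pvSeqsB]
  | succ f ih =>
    intro xs dists h
    have hne : ((f + 1 : Nat) : Int) ≠ 0 := by push_cast; omega
    rw [pvBacktrackA, pvSeqsB]
    simp only [if_neg hne]
    -- rewrite the loop test using the value-sum invariant
    have hcond : ∀ (d : Int), d ∈ PySem.List.pyRange 0 10 1 → ∀ (acc : List (List (Int × Int))),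
        (if (PySem.Dict.counter xs : PySem.Dict Int Int).values.sum + d ≤ total then
          pvBacktrackA total f (((f + 1 : Nat) : Int) - 1) ((PySem.Dict.counter xs).insert d ((PySem.Dict.counter xs).getD d 0 + 1)) acc
        else acc)
        = (if decide (d ≤ ((f:Int) + 1)) = true then
            pvBacktrackA total f (f : Int) (PySem.Dict.counter (xs ++ [d])) acc
          else acc) := by
      intro d _ acc
      rw [pvValuesSumCounter]
      have h1 : (((f + 1 : Nat) : Int) - 1) = (f : Int) := by push_cast; ring
      have h2 : (PySem.Dict.counter xs : PySem.Dict Int Int).insert d ((PySem.Dict.counter xs).getD d 0 + 1)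
          = PySem.Dict.counter (xs ++ [d]) := by
        rw [PySem.Dict.counter_append_singleton]; rfl
      rw [h1, h2]
      by_cases hd : d ≤ (f:Int) + 1
      · rw [if_pos (by omega), if_pos (by simpa using hd)]
      · rw [if_neg (by omega), if_neg (by simpa using hd)]
    rw [PySem.List.foldl_congr_mem' _ _ _ dists hcond]
    rw [PySem.List.foldl_if_eq_foldl_filter]
    rw [pvFilterRange ((f:Int)+1) (by omega)]
    have hih : ∀ d ∈ PySem.List.pyRange 0 (min 9 ((f:Int)+1) + 1) 1, ∀ (acc : List (List (Int × Int))),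
        pvBacktrackA total f (f : Int) (PySem.Dict.counter (xs ++ [d])) acc
        = acc ++ (pvSeqsB f (f : Int)).map (fun seq => (PySem.Dict.counter ((xs ++ [d]) ++ seq)).items) := by
      intro d _ acc
      apply ih
      simp; push_cast at h ⊢; omega
    rw [PySem.List.foldl_congr_mem' _ _ _ dists hih]
    rw [PySem.List.foldl_append_eq_flatMap]
    have hrem : ((f + 1 : Nat) : Int) - 1 = (f : Int) := by push_cast; ring
    have hmin : min 9 (((f+1 : Nat)) : Int) = min 9 ((f:Int)+1) := by push_cast; ring_nf
    rw [hrem, hmin, List.map_flatMap]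
    congr 1
    simp [List.map_map, Function.comp_def, List.append_assoc]

-- ===== VERDICT (by name: the statement is the Claim_ definition above) =====
theorem generate_digit_distributions_spec : Claim_equal_generate_digit_distributions := by
  intro total _
  unfold Spec_generate_digit_distributions
  unfold generate_digit_distributions generate_digit_distributions_alt
  by_cases htot : 0 ≤ total
  · have hf : ((total.toNat : Nat) : Int) = total := Int.toNat_of_nonneg htot
    have hmain := pvMain total total.toNat [] [] (by simp [hf])
    rw [hf] at hmain
    rw [show (PySem.Dict.empty : PySem.Dict Int Int) = PySem.Dict.counter [] from rfl]
    rw [hmain]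
    simp only [List.nil_append]
    exact List.map_congr_left (fun a _ => by
      rw [show (PySem.Dict.counter [] : PySem.Dict Int Int) = PySem.Dict.empty from rfl,
        PySem.Dict.foldl_insert_getD_add_one_eq_counter])
  · have hz : total.toNat = 0 := Int.toNat_of_nonpos (by omega)
    have hne : total ≠ 0 := by omega
    rw [hz]
    rw [pvBacktrackA, pvSeqsB]
    simp [hne]
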